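-- pv_equiv track=rewrite | github.com/HeCongjie/DataMining | 第一次作业/code.py | find_len
-- ===== SOURCE A (Python) =====
-- def find_len(str_arr, point):
-- 	end = point+1
-- 	start = point
-- 	max_len = 0
-- 	while start>=0 and end<=len(str_arr)-1:
-- 		if str_arr[start] == str_arr[end]:
-- 			start -=1
-- 			end +=1
-- 			max_len +=2
-- 		else:
-- 			return max_len
-- 	return max_len
-- ===== SOURCE B (Python) =====
-- def find_len(str_arr, point):
--     if point < 0:
--         return 0
--     left = list(reversed(str_arr[:point + 1]))
--     right = str_arr[point + 1:]
--     count = 0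
--     for a, b in zip(left, right):
--         if a != b:
--             break
--         count += 1
--     return 2 * count
-- ===== Notes on version B (the rewrite author's own statement) =====
-- stated objective: simpler
-- what changed: Replaces the two-index expansion loop with a common-prefix count of the reversed left slice against the right slice (zip stops at the shorter side, replacing A's bound checks).
import Mathlib
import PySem

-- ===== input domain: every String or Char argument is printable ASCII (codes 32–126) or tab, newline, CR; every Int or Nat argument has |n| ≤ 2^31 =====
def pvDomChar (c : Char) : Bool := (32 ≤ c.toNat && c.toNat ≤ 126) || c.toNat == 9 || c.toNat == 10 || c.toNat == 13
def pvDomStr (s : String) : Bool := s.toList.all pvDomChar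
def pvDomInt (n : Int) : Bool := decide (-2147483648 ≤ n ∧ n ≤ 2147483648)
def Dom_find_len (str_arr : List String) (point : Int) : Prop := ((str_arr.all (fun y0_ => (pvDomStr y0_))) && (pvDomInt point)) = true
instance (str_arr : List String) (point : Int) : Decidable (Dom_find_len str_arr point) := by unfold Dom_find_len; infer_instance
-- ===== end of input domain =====

-- B replaces A's two-index expansion loop by a common-prefix count of the reversed
-- left slice against the right slice (simpler decomposition; same exact values).


-- ===== PORT A =====
-- while start>=0 and end<=len-1: …  — fuel = point.toNat+1 bounds the iterations
-- (start begins at point and strictly decreases, so the fuel is never exhausted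
-- before the loop condition fails).
def findLenLoop (arr : List String) : Nat → Int → Int → Int → Int
  | 0, _, _, max_len => max_len
  | f + 1, start, e, max_len =>
    if start ≥ 0 ∧ e ≤ (arr.length : Int) - 1 then
      if (PySem.List.pyGet? arr start).getD "" = (PySem.List.pyGet? arr e).getD "" then
        findLenLoop arr f (start - 1) (e + 1) (max_len + 2)
      else max_len
    else max_len

def find_len (str_arr : List String) (point : Int) : Int :=
  findLenLoop str_arr (point.toNat + 1) point (point + 1) 0

-- ===== PORT B =====
-- count of the common prefix of the two lists (the zip loop with break in Source B)
def commonPrefixCount : List String → List String → Int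
  | [], _ => 0
  | _ :: _, [] => 0
  | a :: as, b :: bs => if a ≠ b then 0 else 1 + commonPrefixCount as bs

def find_len_alt (str_arr : List String) (point : Int) : Int :=
  if point < 0 then 0
  else
    2 * commonPrefixCount
        (PySem.List.slice str_arr none (some (point + 1))).reverse
        (PySem.List.slice str_arr (some (point + 1)) none)

-- ===== PRECONDITION & SPEC =====
def Spec_find_len (str_arr : List String) (point : Int) (out : Int) : Prop := out = find_len_alt str_arr point
instance (str_arr : List String) (point : Int) (out : Int) : Decidable (Spec_find_len str_arr point out) := by unfold Spec_find_len; infer_instance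

-- ===== CLAIM (what is proved, stated in full; the proofs are below) =====
def Claim_equal_find_len : Prop := ∀ (str_arr : List String) (point : Int), Dom_find_len str_arr point → Spec_find_len str_arr point (find_len str_arr point)

-- ===== LEMMAS AND PROOFS =====

theorem commonPrefixCount_nil_right (l : List String) : commonPrefixCount l [] = 0 := by
  cases l <;> rfl

-- Core loop characterisation: with start = s < arr.length (a Nat) and right list
-- arr.drop e, the loop adds 2 · (common prefix of reversed left part and right part).
theorem findLenLoop_eq (arr : List String) :
    ∀ (f s e : Nat) (acc : Int), s < f → s < arr.length →
      findLenLoop arr f (s : Int) (e : Int) acc =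
        acc + 2 * commonPrefixCount ((arr.take (s + 1)).reverse) (arr.drop e) := by
  intro f
  induction f with
  | zero => intro s e acc h; omega
  | succ f ih =>
    intro s e acc hf hs
    by_cases he : e < arr.length
    · have hcond : (s : Int) ≥ 0 ∧ (e : Int) ≤ (arr.length : Int) - 1 := by
        constructor <;> [positivity; omega]
      have hget_s : (PySem.List.pyGet? arr (s : Int)).getD "" = arr[s] := by
        simp [PySem.List.pyGet?_natCast, List.getElem?_eq_getElem hs]
      have hget_e : (PySem.List.pyGet? arr (e : Int)).getD "" = arr[e] := by
        simp [PySem.List.pyGet?_natCast, List.getElem?_eq_getElem he]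
      have hleft : (arr.take (s + 1)).reverse = arr[s] :: (arr.take s).reverse := by
        rw [List.take_add_one, List.getElem?_eq_getElem hs]
        simp
      have hright : arr.drop e = arr[e] :: arr.drop (e + 1) := by
        rw [List.drop_eq_getElem_cons he]
      rw [findLenLoop, if_pos hcond, hget_s, hget_e, hleft, hright]
      by_cases heq : arr[s] = arr[e]
      · rw [if_pos heq]
        rcases Nat.eq_zero_or_pos s with hs0 | hs0
        · subst hs0
          simp only [Nat.cast_zero]
          -- start becomes -1: next step returns acc+2; RHS prefix count is 1
          have : findLenLoop arr f ((0 : Int) - 1) ((e : Int) + 1) (acc + 2) = acc + 2 := by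
            cases f with
            | zero => rfl
            | succ f' =>
              rw [findLenLoop, if_neg]
              omega
          rw [this]
          simp [commonPrefixCount, heq]
        · have h1 : ((s : Int) - 1) = ((s - 1 : Nat) : Int) := by omega
          have h2 : ((e : Int) + 1) = ((e + 1 : Nat) : Int) := by omega
          rw [h1, h2, ih (s - 1) (e + 1) (acc + 2) (by omega) (by omega)]
          have h3 : s - 1 + 1 = s := by omega
          rw [h3]
          simp [commonPrefixCount, heq]
          ring
      · rw [if_neg heq]
        simp [commonPrefixCount, heq]
    · -- right side exhausted: loop condition fails, prefix count is 0
      have hdrop : arr.drop e = [] := List.drop_eq_nil_of_le (by omega)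
      rw [findLenLoop, if_neg (by omega), hdrop, commonPrefixCount_nil_right]
      ring

-- ===== VERDICT (by name: the statement is the Claim_ definition above) =====
theorem find_len_spec : Claim_equal_find_len := by
  intro arr point _
  unfold Spec_find_len find_len find_len_alt
  by_cases hneg : point < 0
  · rw [if_pos hneg]
    have hfuel : point.toNat + 1 = 1 := by omega
    rw [hfuel, findLenLoop, if_neg (by omega)]
  · rw [if_neg hneg]
    have hp : point = ((point.toNat : Nat) : Int) := by omega
    have hslice1 : PySem.List.slice arr none (some (point + 1)) = arr.take (point.toNat + 1) := by
      rw [PySem.List.slice_to]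
      · congr 1
        omega
      · omega
    have hslice2 : PySem.List.slice arr (some (point + 1)) none = arr.drop (point.toNat + 1) := by
      rw [PySem.List.slice_from]
      · congr 1
        omega
      · omega
    rw [hslice1, hslice2]
    by_cases hlen : point.toNat < arr.length
    · rw [hp]
      simp only [Int.toNat_natCast]
      have h2 : ((point.toNat : Nat) : Int) + 1 = ((point.toNat + 1 : Nat) : Int) := by omega
      rw [h2, findLenLoop_eq arr (point.toNat + 1) point.toNat (point.toNat + 1) 0
          (by omega) hlen]
      ring
    · -- point ≥ length: loop condition fails immediately and drop gives []
      have hdrop : arr.drop (point.toNat + 1) = [] := List.drop_eq_nil_of_le (by omega)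
      rw [hdrop, commonPrefixCount_nil_right, findLenLoop, if_neg (by omega)]
      ring
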